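-- pv_equiv track=rewrite | github.com/Junjie-Ye/CCTU | data/check_code/70/check_constraint_0.py | _ends_with_period_allowing_closers
-- ===== SOURCE A (Python) =====
-- def _ends_with_period_allowing_closers(text: str) -> bool:
--     """
--     Check if the response ends with a period, allowing trailing closing punctuation like quotes/brackets.
--     Acceptable endings include:
--       - ... .
--       - ... ."
--       - ... .’)
--     """
--     closers = set(')"\']}>»”’)】)')
--     i = len(text) - 1
--     # Skip trailing whitespace
--     while i >= 0 and text[i].isspace():
--         i -= 1
--     # Skip closing punctuation
--     while i >= 0 and text[i] in closers:
--         i -= 1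
--     # Now check for period
--     return i >= 0 and text[i] == '.'
-- ===== SOURCE B (Python) =====
-- def _ends_with_period_allowing_closers(text: str) -> bool:
--     """One forward pass: a tiny DFA tracking whether the text read so far
--     matches  .*  '.'  closers*  whitespace*  ."""
--     closers = ')"\']}>»”’】'
--     state = 0  # 0 = reject, 1 = after period (closers/ws ok), 2 = in whitespace tail
--     for c in text:
--         if c == '.':
--             state = 1
--         elif state == 1:
--             state = 1 if c in closers else (2 if c.isspace() else 0)
--         elif state == 2:
--             state = 2 if c.isspace() else 0
--     return state != 0
-- ===== Notes on version B (the rewrite author's own statement) =====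
-- stated objective: alternative
-- what changed: Replaced the backward two-phase index scan (skip trailing whitespace, then trailing closers, then test for '.') with a single forward pass driving a 3-state DFA for the language .* '.' closers* whitespace*.
import Mathlib
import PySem

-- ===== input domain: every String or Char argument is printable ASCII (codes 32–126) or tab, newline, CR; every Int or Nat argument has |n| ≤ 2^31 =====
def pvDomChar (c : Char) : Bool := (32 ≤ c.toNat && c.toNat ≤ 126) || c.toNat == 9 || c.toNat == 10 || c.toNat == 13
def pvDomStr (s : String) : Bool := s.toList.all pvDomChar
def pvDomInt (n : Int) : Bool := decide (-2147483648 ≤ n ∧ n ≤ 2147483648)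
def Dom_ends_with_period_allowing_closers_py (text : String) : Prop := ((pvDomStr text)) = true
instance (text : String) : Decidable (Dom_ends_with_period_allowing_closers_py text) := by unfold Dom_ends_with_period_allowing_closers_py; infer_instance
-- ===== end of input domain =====

-- A = backward scan (skip trailing whitespace, then trailing closers, test '.');
-- B = one forward pass with a 3-state DFA for  .* '.' closers* ws*  — alternative traversal, same cost.

-- ===== PORT A =====
-- closers = set(')"\']}>»”’)】)')  (duplicates of ')' collapse in the set)
def pvClosers : List Char := [')', '"', '\'', ']', '}', '>', '»', '”', '’', '】']

-- `while i >= 0 and text[i].isspace(): i -= 1`; the Nat argument is i+1, so 0 means i = -1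
def pvSkipWs (cs : List Char) : Nat → Nat
  | 0 => 0
  | n + 1 => if PySem.Chars.isspace (cs.getD n ' ') then pvSkipWs cs n else n + 1

-- `while i >= 0 and text[i] in closers: i -= 1`
def pvSkipClosers (cs : List Char) : Nat → Nat
  | 0 => 0
  | n + 1 => if pvClosers.contains (cs.getD n ' ') then pvSkipClosers cs n else n + 1

def ends_with_period_allowing_closers_py (text : String) : Bool :=
  let cs := text.toList
  let i1 := pvSkipWs cs cs.length
  let i2 := pvSkipClosers cs i1
  -- `return i >= 0 and text[i] == '.'`  (i2 = i+1)
  decide (0 < i2) && (cs.getD (i2 - 1) ' ' == '.')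

-- ===== PORT B =====
-- closers = ')"\']}>»”’】'  (B's own literal, as in Source B)
def pvClosersB : List Char := [')', '"', '\'', ']', '}', '>', '»', '”', '’', '】']

def pvStep (s : Nat) (c : Char) : Nat :=
  if c == '.' then 1
  else if s == 1 then (if pvClosersB.contains c then 1 else if PySem.Chars.isspace c then 2 else 0)
  else if s == 2 then (if PySem.Chars.isspace c then 2 else 0)
  else 0

def ends_with_period_allowing_closers_py_alt (text : String) : Bool :=
  (text.toList.foldl pvStep 0) != 0

-- ===== PRECONDITION & SPEC =====
def Spec_ends_with_period_allowing_closers_py (text : String) (out : Bool) : Prop := out = ends_with_period_allowing_closers_py_alt text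
instance (text : String) (out : Bool) : Decidable (Spec_ends_with_period_allowing_closers_py text out) := by unfold Spec_ends_with_period_allowing_closers_py; infer_instance

-- ===== CLAIM (what is proved, stated in full; the proofs are below) =====
def Claim_equal_ends_with_period_allowing_closers_py : Prop := ∀ (text : String), Dom_ends_with_period_allowing_closers_py text → Spec_ends_with_period_allowing_closers_py text (ends_with_period_allowing_closers_py text)

-- ===== LEMMAS AND PROOFS =====

-- A's result on a char list, and its closers-only variant (the state the DFA's state 1 tracks)
def pvA (cs : List Char) : Bool :=
  let i1 := pvSkipWs cs cs.length
  let i2 := pvSkipClosers cs i1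
  decide (0 < i2) && (cs.getD (i2 - 1) ' ' == '.')

def pvA1 (cs : List Char) : Bool :=
  let i2 := pvSkipClosers cs cs.length
  decide (0 < i2) && (cs.getD (i2 - 1) ' ' == '.')

lemma pvSkipWs_le (cs : List Char) (n : Nat) : pvSkipWs cs n ≤ n := by
  induction n with
  | zero => simp [pvSkipWs]
  | succ k ih => simp only [pvSkipWs]; split <;> omega

lemma pvSkipClosers_le (cs : List Char) (n : Nat) : pvSkipClosers cs n ≤ n := by
  induction n with
  | zero => simp [pvSkipClosers]
  | succ k ih => simp only [pvSkipClosers]; split <;> omega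

lemma getD_append_lt (cs : List Char) (c : Char) (k : Nat) (h : k < cs.length) (d : Char) :
    (cs ++ [c]).getD k d = cs.getD k d := by
  simp [List.getD, List.getElem?_append_left h]

lemma getD_concat_length (cs : List Char) (c : Char) (d : Char) :
    (cs ++ [c]).getD cs.length d = c := by
  simp [List.getD]

lemma pvSkipWs_append (cs : List Char) (c : Char) (n : Nat) (h : n ≤ cs.length) :
    pvSkipWs (cs ++ [c]) n = pvSkipWs cs n := by
  induction n with
  | zero => rfl
  | succ k ih =>
    simp only [pvSkipWs, getD_append_lt cs c k (by omega)]
    rw [ih (by omega)]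

lemma pvSkipClosers_append (cs : List Char) (c : Char) (n : Nat) (h : n ≤ cs.length) :
    pvSkipClosers (cs ++ [c]) n = pvSkipClosers cs n := by
  induction n with
  | zero => rfl
  | succ k ih =>
    simp only [pvSkipClosers, getD_append_lt cs c k (by omega)]
    rw [ih (by omega)]

lemma closersB_eq : pvClosersB = pvClosers := rfl

lemma closer_not_space (c : Char) (h : pvClosers.contains c = true) :
    PySem.Chars.isspace c = false := by
  simp [pvClosers] at h
  rcases h with h|h|h|h|h|h|h|h|h|h <;> subst h <;> decide

lemma len_concat (cs : List Char) (c : Char) : (cs ++ [c]).length = cs.length + 1 := by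
  simp

lemma pvA1_append_closer (cs : List Char) (c : Char) (hc : pvClosers.contains c = true) :
    pvA1 (cs ++ [c]) = pvA1 cs := by
  simp only [pvA1, len_concat]
  simp only [pvSkipClosers, getD_concat_length, hc, if_true]
  rw [pvSkipClosers_append cs c cs.length le_rfl]
  have hle := pvSkipClosers_le cs cs.length
  by_cases h0 : 0 < pvSkipClosers cs cs.length
  · rw [getD_append_lt cs c _ (by omega)]
  · simp at h0; simp [h0]

-- the joint invariant: the DFA state after cs determines A's closers-only check (state 1)
-- and A's full check (state ≠ 0), and the state is always ≤ 2
lemma pvMain (cs : List Char) :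
    cs.foldl pvStep 0 ≤ 2 ∧
    ((cs.foldl pvStep 0 == 1) = pvA1 cs) ∧
    ((cs.foldl pvStep 0 != 0) = pvA cs) := by
  induction cs using List.reverseRecOn with
  | nil => exact ⟨by decide, by decide, by decide⟩
  | append_singleton cs c ih =>
    obtain ⟨hle, h1, h2⟩ := ih
    rw [List.foldl_append]
    simp only [List.foldl_cons, List.foldl_nil]
    by_cases hdot : c = '.'
    · subst hdot
      have hstep : pvStep (cs.foldl pvStep 0) '.' = 1 := by simp [pvStep]
      have hnc : pvClosers.contains '.' = false := by decide
      have hns : PySem.Chars.isspace '.' = false := by decide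
      rw [hstep]
      refine ⟨by omega, ?_, ?_⟩
      · simp only [pvA1, len_concat]
        simp only [pvSkipClosers, getD_concat_length, hnc, Bool.false_eq_true, if_false]
        simp
      · simp only [pvA, len_concat]
        simp only [pvSkipWs, getD_concat_length, hns, Bool.false_eq_true, if_false]
        simp only [pvSkipClosers, getD_concat_length, hnc, Bool.false_eq_true, if_false]
        simp
    · by_cases hclo : pvClosers.contains c = true
      · have hns := closer_not_space c hclo
        have hstep : pvStep (cs.foldl pvStep 0) c
            = if cs.foldl pvStep 0 == 1 then 1 else 0 := by
          simp only [pvStep, closersB_eq, beq_iff_eq, if_neg hdot, hclo, if_true, hns]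
          rcases Nat.lt_or_ge (cs.foldl pvStep 0) 3 with h|h
          · interval_cases (cs.foldl pvStep 0) <;> simp
          · omega
        rw [hstep]
        have hA1 : pvA1 (cs ++ [c]) = pvA1 cs := pvA1_append_closer cs c hclo
        have hA : pvA (cs ++ [c]) = pvA1 (cs ++ [c]) := by
          simp only [pvA, pvA1, len_concat]
          simp only [pvSkipWs, getD_concat_length, hns, Bool.false_eq_true, if_false]
        rw [hA, hA1, ← h1]
        refine ⟨by split <;> omega, ?_, ?_⟩
        · by_cases he : cs.foldl pvStep 0 = 1 <;> simp [he]
        · by_cases he : cs.foldl pvStep 0 = 1 <;> simp [he]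
      · by_cases hsp : PySem.Chars.isspace c = true
        · have hstep : pvStep (cs.foldl pvStep 0) c
              = if cs.foldl pvStep 0 == 0 then 0 else 2 := by
            simp only [pvStep, closersB_eq, beq_iff_eq, if_neg hdot, hclo, hsp, if_true]
            rcases Nat.lt_or_ge (cs.foldl pvStep 0) 3 with h|h
            · interval_cases (cs.foldl pvStep 0) <;> simp
            · omega
          rw [hstep]
          have hA1 : pvA1 (cs ++ [c]) = false := by
            simp only [pvA1, len_concat]
            simp only [pvSkipClosers, getD_concat_length, hclo, Bool.false_eq_true, if_false]
            simp [hdot]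
          have hA : pvA (cs ++ [c]) = pvA cs := by
            simp only [pvA, len_concat]
            simp only [pvSkipWs, getD_concat_length, hsp, if_true]
            rw [pvSkipWs_append cs c cs.length le_rfl]
            have hw := pvSkipWs_le cs cs.length
            rw [pvSkipClosers_append cs c _ (by omega)]
            have hc2 := pvSkipClosers_le cs (pvSkipWs cs cs.length)
            by_cases h0 : 0 < pvSkipClosers cs (pvSkipWs cs cs.length)
            · rw [getD_append_lt cs c _ (by omega)]
            · simp at h0; simp [h0]
          refine ⟨by split <;> omega, ?_, ?_⟩
          · rw [hA1]; split <;> decide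
          · rw [hA, ← h2]
            by_cases hz : cs.foldl pvStep 0 = 0 <;> simp [hz]
        · have hstep : pvStep (cs.foldl pvStep 0) c = 0 := by
            simp only [pvStep, closersB_eq, beq_iff_eq, if_neg hdot, hclo, hsp]
            rcases Nat.lt_or_ge (cs.foldl pvStep 0) 3 with h|h
            · interval_cases (cs.foldl pvStep 0) <;> simp
            · omega
          rw [hstep]
          have hA1 : pvA1 (cs ++ [c]) = false := by
            simp only [pvA1, len_concat]
            simp only [pvSkipClosers, getD_concat_length, hclo, Bool.false_eq_true, if_false]
            simp [hdot]
          have hA : pvA (cs ++ [c]) = false := by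
            simp only [pvA, len_concat]
            simp only [pvSkipWs, getD_concat_length, hsp, Bool.false_eq_true, if_false]
            simp only [pvSkipClosers, getD_concat_length, hclo]
            simp [hdot]
          exact ⟨by omega, by rw [hA1]; decide, by rw [hA]; decide⟩

-- ===== VERDICT (by name: the statement is the Claim_ definition above) =====
theorem ends_with_period_allowing_closers_py_spec : Claim_equal_ends_with_period_allowing_closers_py := by
  intro text _
  unfold Spec_ends_with_period_allowing_closers_py
  unfold ends_with_period_allowing_closers_py ends_with_period_allowing_closers_py_alt
  exact ((pvMain text.toList).2.2).symm
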